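-- pv_equiv track=rewrite | github.com/kreimben/Coding-Test | leetcode.com/Design Add and Search Words Data Structure.py | run_with
-- ===== SOURCE A (Python) =====
-- class WordDictionary:
--
--     def __init__(self):
--         self.d = {}
--
--     def addWord(self, word: str) -> None:
--         curr = self.d
--         for ch in word:
--             if not curr.get(ch):
--                 curr[ch] = {}
--             curr = curr[ch]
--         curr.update({'*': True})
--
--     def search(self, word: str) -> bool:
--         curr = self.d
--         for ch in word:
--             if ch != '.' and not curr.get(ch):
--                 return False
--             elif ch == '.':
--                 for k in curr:
--                     if k != '*' and self.search(word.replace('.', k, 1)): return True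
--                 return False
--             else:
--                 curr = curr[ch]
--         return curr.get('*', False)
--
-- def run_with(commands: [str], inputs: [str]) -> [None | bool]:
--     res = []
--     s = WordDictionary()
--     for command, input_value in list(zip(commands, inputs)):
--         if command == 'WordDictionary':
--             res.append(None)
--         elif command == 'addWord':
--             s.addWord(input_value[0])
--             res.append(None)
--         elif command == 'search':
--             res.append(s.search(input_value[0]))
--     return res
-- ===== SOURCE B (Python) =====
-- def run_with(commands, inputs):
--     # No trie at all: keep the added words in a list; a search scans the list
--     # and matches the pattern position by position ('.' matches any char).
--     words = []
--     res = []
--     for command, input_value in zip(commands, inputs):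
--         if command == 'WordDictionary':
--             res.append(None)
--         elif command == 'addWord':
--             words.append(input_value[0])
--             res.append(None)
--         elif command == 'search':
--             p = input_value[0]
--             res.append(any(len(w) == len(p)
--                            and all(pc == '.' or pc == wc for pc, wc in zip(p, w))
--                            for w in words))
--     return res
-- ===== Notes on version B (the rewrite author's own statement) =====
-- stated objective: simpler
-- what changed: Replaces A's nested-dict trie with '*' sentinel keys and wildcard search that rebuilds the query string and restarts from the root by a plain list of added words scanned with a direct per-character match ('.' matches any char).
-- outside the precondition, e.g. on run_with(['addWord', 'search'], [['a*'], ['a.']]): A returns [None, False], B returns [None, True]; on run_with(['addWord', 'search'], [['*'], ['']]): A returns [None, {'*': True}], B returns [None, False]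
import Mathlib
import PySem

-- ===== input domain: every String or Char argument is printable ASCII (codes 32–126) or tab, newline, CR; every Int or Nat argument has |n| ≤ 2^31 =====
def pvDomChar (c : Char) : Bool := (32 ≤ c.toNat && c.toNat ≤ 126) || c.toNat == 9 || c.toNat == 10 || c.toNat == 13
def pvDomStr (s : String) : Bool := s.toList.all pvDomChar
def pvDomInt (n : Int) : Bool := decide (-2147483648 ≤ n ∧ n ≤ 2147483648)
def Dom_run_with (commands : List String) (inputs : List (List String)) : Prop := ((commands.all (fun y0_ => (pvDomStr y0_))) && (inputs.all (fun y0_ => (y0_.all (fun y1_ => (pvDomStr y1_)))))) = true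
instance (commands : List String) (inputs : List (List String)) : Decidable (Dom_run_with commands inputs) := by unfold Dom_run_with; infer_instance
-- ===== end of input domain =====

-- B replaces A's nested-dict trie (with '*' sentinel keys and a wildcard search that
-- rebuilds the query string and restarts from the root) by a plain list of the added
-- words scanned with a direct per-character match; equivalence is proved on Pre_.

-- ===== PORT A =====
-- A's trie node is a Python dict mapping chars to child dicts, with the sentinel key
-- '*' ↦ True marking end-of-word.  Ported as a node carrying the end flag (the '*'
-- entry) and the char children as an association list in insertion order.
-- (A nested 'List (Char × Trie)' field is not allowed, hence the mutual pair.)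
mutual
inductive Trie where
  | node : Bool → Children → Trie
inductive Children where
  | nil : Children
  | cons : Char → Trie → Children → Children
end

def emptyT : Trie := .node false .nil   -- {}

-- curr.get(ch) (first match; keys are distinct by construction)
def childGet : Children → Char → Option Trie
  | .nil, _ => none
  | .cons k t rest, c => if k == c then some t else childGet rest c

-- curr[ch] = t : overwrite in place, or append a new key (dict insertion order)
def childPut : Children → Char → Trie → Children
  | .nil, c, t => .cons c t .nil
  | .cons k t0 rest, c, t => if k == c then .cons k t rest else .cons k t0 (childPut rest c t)

def isEmptyT : Trie → Bool
  | .node false .nil => true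
  | _ => false

-- WordDictionary.addWord: walk the word, creating a child where 'not curr.get(ch)'
-- (absent, or present but an empty dict — falsy), then set the '*' flag at the end.
def addA : Trie → List Char → Trie
  | .node _ cs, [] => .node true cs            -- curr.update({'*': True})
  | .node e cs, c :: r =>
      let child := match childGet cs c with
        | some t => if isEmptyT t then emptyT else t   -- 'if not curr.get(ch): curr[ch] = {}'
        | none => emptyT
      .node e (childPut cs c (addA child r))

-- word.replace('.', k, 1) — replace the first '.' only (exact hand port)
def replaceFirstDot : List Char → Char → List Char
  | [], _ => []
  | c :: r, k => if c == '.' then k :: r else c :: replaceFirstDot r k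

-- WordDictionary.search.  Python recurses by restarting self.search from the root on a
-- rebuilt word; that recursion is not structural, so the port carries fuel counting the
-- wildcard restarts.  The top-level call passes (count of '.') + 1: each restart
-- replaces one '.' by a trie key, and on Pre_ no trie key is '.', so the fuel is never
-- exhausted (where it would be, Python's own recursion does not terminate either).
mutual
def searchA (fuel : Nat) (root : Trie) (word : List Char) : Bool :=
  match fuel with
  | 0 => false
  | f + 1 => walkA f root word root word
  termination_by (fuel, 0, 0)
-- the 'for ch in word' loop: curr is the current node, rem the chars still to scan
def walkA (f : Nat) (root : Trie) (word : List Char) (curr : Trie) (rem : List Char) : Bool :=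
  match curr, rem with
  | .node e _, [] => e                                  -- curr.get('*', False)
  | .node _ cs, ch :: rest =>
    if ch == '.' then tryA f root word cs               -- 'for k in curr: …'
    else match childGet cs ch with
      | none => false                                   -- ch != '.' and not curr.get(ch)
      | some t => walkA f root word t rest              -- curr = curr[ch]
  termination_by (f, 2, rem.length)
-- 'for k in curr: if k != "*" and self.search(word.replace(".", k, 1)): return True';
-- the '*' entry is the end flag here, so the children list holds exactly the keys ≠ '*'
def tryA (f : Nat) (root : Trie) (word : List Char) : Children → Bool
  | .nil => false
  | .cons k _ rest => searchA f root (replaceFirstDot word k) || tryA f root word rest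
  termination_by cs => (f, 1, sizeOf cs)
end

-- input_value[0]; an empty list raises IndexError in Python — excluded by Pre_
def hd0 (iv : List String) : String :=
  match iv with
  | [] => ""
  | x :: _ => x

def runA : Trie → List (String × List String) → List (Option Bool)
  | _, [] => []
  | t, (c, iv) :: rest =>
    if c = "WordDictionary" then none :: runA t rest
    else if c = "addWord" then none :: runA (addA t (hd0 iv).toList) rest
    else if c = "search" then
      some (searchA (((hd0 iv).toList.count '.') + 1) t (hd0 iv).toList) :: runA t rest
    else runA t rest

def run_with (commands : List String) (inputs : List (List String)) : List (Option Bool) :=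
  runA emptyT (List.zip commands inputs)

-- ===== PORT B =====
-- len(w) == len(p) and all(pc == '.' or pc == wc for pc, wc in zip(p, w))
def mtchB (p w : String) : Bool :=
  (w.toList.length == p.toList.length) &&
    ((p.toList.zip w.toList).all fun pw => pw.1 == '.' || pw.1 == pw.2)

def runB : List String → List (String × List String) → List (Option Bool)
  | _, [] => []
  | ws, (c, iv) :: rest =>
    if c = "WordDictionary" then none :: runB ws rest
    else if c = "addWord" then none :: runB (ws ++ [hd0 iv]) rest
    else if c = "search" then
      some (ws.any fun w => mtchB (hd0 iv) w) :: runB ws rest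
    else runB ws rest

def run_with_alt (commands : List String) (inputs : List (List String)) : List (Option Bool) :=
  runB [] (List.zip commands inputs)

-- ===== PRECONDITION & SPEC =====
-- Pre_ excludes runs where (a) an addWord/search gets an empty argument list (A raises
-- IndexError), (b) an added or searched word contains '*' (it collides with A's
-- end-of-word sentinel key: A can return a dict instead of a bool, raise
-- AttributeError, or skip a real '*' child during a wildcard search), or (c) a search
-- containing '.' comes after a word containing '.' was added (A's wildcard re-search
-- can then recurse forever; where it happens to return early, B agrees).
def preAux : Bool → List (String × List String) → Bool
  | _, [] => true
  | dotAdded, (c, iv) :: rest =>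
    if c = "addWord" then
      match iv with
      | [] => false
      | w :: _ => (!w.toList.contains '*') && preAux (dotAdded || w.toList.contains '.') rest
    else if c = "search" then
      match iv with
      | [] => false
      | w :: _ => (!w.toList.contains '*') && (!(w.toList.contains '.' && dotAdded)) && preAux dotAdded rest
    else preAux dotAdded rest

def Pre_run_with (commands : List String) (inputs : List (List String)) : Prop :=
  preAux false (List.zip commands inputs) = true

instance (commands : List String) (inputs : List (List String)) : Decidable (Pre_run_with commands inputs) := by
  unfold Pre_run_with; infer_instance

def pvWitness_run_with : List String × List (List String) :=
  (["WordDictionary", "addWord", "search", "search"], [[""], ["ab"], ["a."], ["b"]])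

def Spec_run_with (commands : List String) (inputs : List (List String)) (out : List (Option Bool)) : Prop := out = run_with_alt commands inputs
instance (commands : List String) (inputs : List (List String)) (out : List (Option Bool)) : Decidable (Spec_run_with commands inputs out) := by unfold Spec_run_with; infer_instance

-- ===== CLAIM (what is proved, stated in full; the proofs are below) =====
def Claim_equal_run_with : Prop := ∀ (commands : List String) (inputs : List (List String)), Dom_run_with commands inputs → Pre_run_with commands inputs → Spec_run_with commands inputs (run_with commands inputs)

-- ===== LEMMAS AND PROOFS =====

-- plain (wildcard-free) membership of a word in the trie
def containsT : Trie → List Char → Bool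
  | .node e _, [] => e
  | .node _ cs, c :: r =>
    match childGet cs c with
    | none => false
    | some t => containsT t r

-- ideal one-pass wildcard search, the semantic midpoint between the two ports
mutual
def wsearch : Trie → List Char → Bool
  | .node e _, [] => e
  | .node _ cs, c :: r =>
    if c == '.' then anyC cs r
    else match childGet cs c with
      | none => false
      | some t => wsearch t r
  termination_by _ p => (p.length, 1, 0)
def anyC : Children → List Char → Bool
  | .nil, _ => false
  | .cons _ t rest, r => wsearch t r || anyC rest r
  termination_by cs r => (r.length + 1, 0, sizeOf cs)
end

def keysC : Children → List Char
  | .nil => []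
  | .cons k _ rest => k :: keysC rest

mutual
def GoodT : Trie → Prop
  | .node _ cs => GoodC cs ∧ (keysC cs).Nodup
def GoodC : Children → Prop
  | .nil => True
  | .cons _ t rest => GoodT t ∧ GoodC rest
end

mutual
def NoDotT : Trie → Prop
  | .node _ cs => NoDotC cs
def NoDotC : Children → Prop
  | .nil => True
  | .cons k t rest => k ≠ '.' ∧ NoDotT t ∧ NoDotC rest
end

def memC : Children → Char → Trie → Prop
  | .nil, _, _ => False
  | .cons k t rest, c, u => (c = k ∧ u = t) ∨ memC rest c u

-- recursive form of B's matcher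
def mtchR : List Char → List Char → Bool
  | [], [] => true
  | p :: ps, w :: ws => (p == '.' || p == w) && mtchR ps ws
  | _, _ => false

-- descend along a literal prefix
def desc : Trie → List Char → Option Trie
  | t, [] => some t
  | .node _ cs, c :: r =>
    match childGet cs c with
    | none => none
    | some t => desc t r

theorem isEmptyT_collapse (t : Trie) : (if isEmptyT t then emptyT else t) = t := by
  match t with
  | .node false .nil => rfl
  | .node true cs => rfl
  | .node false (.cons k t rest) => rfl


theorem childGet_put (cs : Children) (c : Char) (t : Trie) (c' : Char) :
    childGet (childPut cs c t) c' = if c = c' then some t else childGet cs c' := by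
  match cs with
  | .nil => by_cases h : c = c' <;> simp [childPut, childGet, beq_iff_eq, h]
  | .cons k t0 rest =>
    by_cases hk : k = c
    · subst hk
      by_cases h : k = c' <;> simp [childPut, childGet, beq_iff_eq, h]
    · by_cases h : k = c'
      · subst h
        simp [childPut, childGet, beq_iff_eq, hk, Ne.symm hk]
      · simp [childPut, childGet, beq_iff_eq, hk, h, childGet_put rest c t c']

theorem contains_empty (v : List Char) : containsT emptyT v = false := by
  cases v <;> simp [containsT, emptyT, childGet]


theorem contains_add (w : List Char) : ∀ (t : Trie) (v : List Char),
    containsT (addA t w) v = (containsT t v || (v == w)) := by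
  match w with
  | [] =>
    intro t v
    match t, v with
    | .node e cs, [] => simp [addA, containsT]
    | .node e cs, c :: r =>
      simp only [addA, containsT]
      cases childGet cs c <;> simp
  | c :: r =>
    intro t v
    match t, v with
    | .node e cs, [] => simp [addA, containsT]
    | .node e cs, c' :: r' =>
      simp only [addA, containsT, childGet_put]
      by_cases hc : c = c'
      · subst hc
        rw [if_pos rfl]
        cases hg : childGet cs c with
        | none =>
          simp only []
          rw [contains_add r emptyT r', contains_empty]
          by_cases hr : r' = r <;> simp [hr]
        | some t1 =>
          simp only [isEmptyT_collapse]
          rw [contains_add r t1 r']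

          by_cases hr : r' = r <;> simp [hr]
      · rw [if_neg hc]
        have : (c' :: r' == c :: r) = false := by
          simp [List.cons_beq_cons]
          intro h; exact absurd h.symm hc
        rw [this]
        cases childGet cs c' <;> simp


theorem keysC_put (cs : Children) (c : Char) (t : Trie) :
    keysC (childPut cs c t) = if c ∈ keysC cs then keysC cs else keysC cs ++ [c] := by
  match cs with
  | .nil => simp [childPut, keysC]
  | .cons k t0 rest =>
    by_cases hk : k = c
    · subst hk; simp [childPut, keysC]
    · have hne : (k == c) = false := by simp [hk]
      simp only [childPut, hne, Bool.false_eq_true, if_false, keysC,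
        keysC_put rest c t]
      by_cases hm : c ∈ keysC rest
      · simp [hm, Ne.symm hk]
      · simp [hm, Ne.symm hk]


theorem goodC_get (cs : Children) (c : Char) (t : Trie) :
    GoodC cs → childGet cs c = some t → GoodT t := by
  match cs with
  | .nil => intro _ h; simp [childGet] at h
  | .cons k t0 rest =>
    intro hg hget
    simp only [childGet] at hget
    by_cases hk : k = c
    · simp [hk] at hget; subst hget; exact hg.1
    · simp [hk] at hget; exact goodC_get rest c t hg.2 hget


theorem goodC_put (cs : Children) (c : Char) (t : Trie) :
    GoodC cs → GoodT t → GoodC (childPut cs c t) := by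
  match cs with
  | .nil => intro _ ht; exact ⟨ht, trivial⟩
  | .cons k t0 rest =>
    intro hg ht
    simp only [childPut]
    by_cases hk : k = c
    · simp only [hk, beq_self_eq_true, if_true]; exact ⟨ht, hg.2⟩
    · have hne : (k == c) = false := by simp [hk]
      simp only [hne, Bool.false_eq_true, if_false]
      exact ⟨hg.1, goodC_put rest c t hg.2 ht⟩


theorem good_add (w : List Char) : ∀ (t : Trie), GoodT t → GoodT (addA t w) := by
  match w with
  | [] =>
    intro t hg
    match t with
    | .node e cs => exact hg
  | c :: r =>
    intro t hg
    match t with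
    | .node e cs =>
      have hchild : GoodT (match childGet cs c with
          | some t => if isEmptyT t then emptyT else t
          | none => emptyT) := by
        cases hget : childGet cs c with
        | none => exact ⟨trivial, List.nodup_nil⟩
        | some t1 =>
          simpa [isEmptyT_collapse] using goodC_get cs c t1 hg.1 hget
      refine ⟨goodC_put _ _ _ hg.1 (good_add r _ hchild), ?_⟩
      rw [keysC_put]
      by_cases hm : c ∈ keysC cs
      · simpa [hm] using hg.2
      · rw [if_neg hm]
        exact List.Nodup.append hg.2 (List.nodup_singleton c)
          (by intro a ha hb; simp at hb; subst hb; exact hm ha)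


theorem nodotC_get (cs : Children) (c : Char) (t : Trie) :
    NoDotC cs → childGet cs c = some t → NoDotT t := by
  match cs with
  | .nil => intro _ h; simp [childGet] at h
  | .cons k t0 rest =>
    intro hn hget
    simp only [childGet] at hget
    by_cases hk : k = c
    · simp [hk] at hget; subst hget; exact hn.2.1
    · simp [hk] at hget; exact nodotC_get rest c t hn.2.2 hget


theorem nodotC_put (cs : Children) (c : Char) (t : Trie) :
    NoDotC cs → NoDotT t → c ≠ '.' → NoDotC (childPut cs c t) := by
  match cs with
  | .nil => intro _ ht hc; exact ⟨hc, ht, trivial⟩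
  | .cons k t0 rest =>
    intro hn ht hc
    simp only [childPut]
    by_cases hk : k = c
    · simp only [hk, beq_self_eq_true, if_true]
      exact ⟨hk ▸ hc, ht, hn.2.2⟩
    · have hne : (k == c) = false := by simp [hk]
      simp only [hne, Bool.false_eq_true, if_false]
      exact ⟨hn.1, hn.2.1, nodotC_put rest c t hn.2.2 ht hc⟩


theorem nodot_add (w : List Char) : ∀ (t : Trie), NoDotT t → ('.' ∉ w) → NoDotT (addA t w) := by
  match w with
  | [] =>
    intro t hn _
    match t with
    | .node e cs => exact hn
  | c :: r =>
    intro t hn hw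
    match t with
    | .node e cs =>
      have hchild : NoDotT (match childGet cs c with
          | some t => if isEmptyT t then emptyT else t
          | none => emptyT) := by
        cases hget : childGet cs c with
        | none => exact trivial
        | some t1 =>
          simpa [isEmptyT_collapse] using nodotC_get cs c t1 hn hget
      exact nodotC_put _ _ _ hn (nodot_add r _ hchild (by simp at hw; exact hw.2))
        (by simp at hw; exact fun h => hw.1 h.symm)


theorem memC_of_childGet (cs : Children) (c : Char) (t : Trie) :
    childGet cs c = some t → memC cs c t := by
  match cs with
  | .nil => intro h; simp [childGet] at h
  | .cons k t0 rest =>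
    intro hget
    simp only [childGet] at hget
    by_cases hk : k = c
    · simp [hk] at hget; exact Or.inl ⟨hk.symm, hget.symm⟩
    · simp [hk] at hget
      exact Or.inr (memC_of_childGet rest c t hget)


theorem memC_key_mem (cs : Children) (c : Char) (t : Trie) :
    memC cs c t → c ∈ keysC cs := by
  match cs with
  | .nil => intro h; exact absurd h (by simp [memC])
  | .cons k t0 rest =>
    intro h
    rcases h with ⟨h1, _⟩ | h2
    · simp [keysC, h1]
    · simp [keysC]; exact Or.inr (memC_key_mem rest c t h2)

theorem childGet_of_memC (cs : Children) (c : Char) (t : Trie) :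
    (keysC cs).Nodup → memC cs c t → childGet cs c = some t := by
  match cs with
  | .nil => intro _ h; exact absurd h (by simp [memC])
  | .cons k t0 rest =>
    intro hnd hmem
    rcases hmem with ⟨h1, h2⟩ | h3
    · subst h1; subst h2; simp [childGet]
    · have hnd' : k ∉ keysC rest ∧ (keysC rest).Nodup := by simpa [keysC] using hnd
      have hck : c ≠ k := by
        intro h; subst h
        exact hnd'.1 (memC_key_mem rest c t h3)
      simp only [childGet]
      rw [if_neg (by simp [Ne.symm hck])]
      exact childGet_of_memC rest c t hnd'.2 h3


theorem memC_good (cs : Children) (c : Char) (t : Trie) :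
    GoodC cs → memC cs c t → GoodT t := by
  match cs with
  | .nil => intro _ h; exact absurd h (by simp [memC])
  | .cons k t0 rest =>
    intro hg hmem
    rcases hmem with ⟨_, h2⟩ | h3
    · subst h2; exact hg.1
    · exact memC_good rest c t hg.2 h3


theorem memC_nodot (cs : Children) (c : Char) (t : Trie) :
    NoDotC cs → memC cs c t → c ≠ '.' := by
  match cs with
  | .nil => intro _ h; exact absurd h (by simp [memC])
  | .cons k t0 rest =>
    intro hn hmem
    rcases hmem with ⟨h1, _⟩ | h3
    · subst h1; exact hn.1
    · exact memC_nodot rest c t hn.2.2 h3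


theorem mtchR_spec (p : List Char) : ∀ (w : List Char),
    mtchR p w = ((w.length == p.length) && ((p.zip w).all fun x => x.1 == '.' || x.1 == x.2)) := by
  induction p with
  | nil => intro w; cases w <;> simp [mtchR]
  | cons c ps ih =>
    intro w
    cases w with
    | nil => simp [mtchR]
    | cons w0 ws =>
      simp only [mtchR, ih ws, List.zip_cons_cons, List.all_cons, List.length_cons]
      by_cases h : (c == '.' || c == w0) = true
      · simp [h]
      · simp [h]


theorem mtchB_eq (p w : String) : mtchB p w = mtchR p.toList w.toList := by
  rw [mtchB, mtchR_spec]


theorem mtchR_nil (w : List Char) : mtchR [] w = (w == ([] : List Char)) := by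
  cases w <;> simp [mtchR]


theorem mtchR_no_dot (p : List Char) : ∀ (w : List Char), ('.' ∉ p) → mtchR p w = (p == w) := by
  induction p with
  | nil => intro w _; cases w <;> simp [mtchR]
  | cons c ps ih =>
    intro w hd
    cases w with
    | nil => simp [mtchR]
    | cons w0 ws =>
      have hc : (c == '.') = false := by
        simp; intro h; exact hd (by simp [h])
      simp only [mtchR, hc, Bool.false_or, List.cons_beq_cons,
        ih ws (fun h => hd (List.mem_cons_of_mem _ h))]


theorem anyC_iff (cs : Children) (r : List Char) :
    anyC cs r = true ↔ ∃ c t, memC cs c t ∧ wsearch t r = true := by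
  match cs with
  | .nil => simp [anyC, memC]
  | .cons k t rest =>
    simp only [anyC, Bool.or_eq_true, anyC_iff rest r]
    constructor
    · rintro (h | ⟨c, u, hm, hw⟩)
      · exact ⟨k, t, Or.inl ⟨rfl, rfl⟩, h⟩
      · exact ⟨c, u, Or.inr hm, hw⟩
    · rintro ⟨c, u, ⟨h1, h2⟩ | h3, hw⟩
      · subst h2; exact Or.inl hw
      · exact Or.inr ⟨c, u, h3, hw⟩


theorem wsearch_correct (p : List Char) : ∀ (t : Trie), GoodT t →
    (wsearch t p = true ↔ ∃ w, containsT t w = true ∧ mtchR p w = true) := by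
  induction p with
  | nil =>
    intro t hg
    match t with
    | .node e cs =>
      simp only [wsearch]
      constructor
      · intro he
        exact ⟨[], by simpa [containsT] using he, by simp [mtchR]⟩
      · rintro ⟨w, hc, hm⟩
        rw [mtchR_nil] at hm
        simp at hm; subst hm
        simpa [containsT] using hc
  | cons c ps ih =>
    intro t hg
    match t with
    | .node e cs =>
      by_cases hc : c = '.'
      · subst hc
        simp only [wsearch, beq_self_eq_true, if_true, anyC_iff]
        constructor
        · rintro ⟨k, u, hm, hw⟩
          obtain ⟨w, hcw, hmw⟩ := (ih u (memC_good cs k u hg.1 hm)).mp hw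
          refine ⟨k :: w, ?_, ?_⟩
          · simp only [containsT, childGet_of_memC cs k u hg.2 hm, hcw]
          · simp [mtchR, hmw]
        · rintro ⟨w, hcw, hmw⟩
          cases w with
          | nil => simp [mtchR] at hmw
          | cons w0 ws =>
            simp only [containsT] at hcw
            cases hget : childGet cs w0 with
            | none => rw [hget] at hcw; simp at hcw
            | some u =>
              rw [hget] at hcw
              refine ⟨w0, u, memC_of_childGet cs w0 u hget, ?_⟩
              exact (ih u (goodC_get cs w0 u hg.1 hget)).mpr
                ⟨ws, hcw, by simpa [mtchR] using hmw⟩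
      · have hcb : (c == '.') = false := by simp [hc]
        simp only [wsearch, hcb, Bool.false_eq_true, if_false]
        cases hget : childGet cs c with
        | none =>
          simp only []
          constructor
          · intro h; simp at h
          · rintro ⟨w, hcw, hmw⟩
            cases w with
            | nil => simp [mtchR] at hmw
            | cons w0 ws =>
              have hw0 : w0 = c := by
                simp [mtchR, hcb] at hmw
                exact hmw.1.symm
              subst hw0
              simp [containsT, hget] at hcw
        | some u =>
          simp only []
          rw [ih u (goodC_get cs c u hg.1 hget)]
          constructor
          · rintro ⟨w, hcw, hmw⟩
            exact ⟨c :: w, by simp [containsT, hget, hcw], by simp [mtchR, hmw]⟩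
          · rintro ⟨w, hcw, hmw⟩
            cases w with
            | nil => simp [mtchR] at hmw
            | cons w0 ws =>
              have hw0 : w0 = c := by
                simp [mtchR, hcb] at hmw
                exact hmw.1.symm
              subst hw0
              simp only [containsT, hget] at hcw
              exact ⟨ws, hcw, by simpa [mtchR, hcb] using hmw⟩


theorem wsearch_append (pre : List Char) : ∀ (t : Trie) (q : List Char), (∀ x ∈ pre, x ≠ '.') →
    wsearch t (pre ++ q) = (match desc t pre with | none => false | some u => wsearch u q) := by
  induction pre with
  | nil => intro t q _; simp [desc]
  | cons x pre' ih =>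
    intro t q hpre
    match t with
    | .node e cs =>
      have hx : (x == '.') = false := by simp [hpre x (by simp)]
      simp only [List.cons_append, wsearch, hx, Bool.false_eq_true, if_false, desc]
      cases hget : childGet cs x with
      | none => simp
      | some u => exact ih u q (fun y hy => hpre y (by simp [hy]))


theorem desc_good (pre : List Char) : ∀ (t u : Trie), GoodT t → desc t pre = some u → GoodT u := by
  induction pre with
  | nil => intro t u hg h; simp [desc] at h; subst h; exact hg
  | cons x pre' ih =>
    intro t u hg h
    match t with
    | .node e cs =>
      simp only [desc] at h
      cases hget : childGet cs x with
      | none => rw [hget] at h; simp at h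
      | some v => rw [hget] at h; exact ih v u (goodC_get cs x v hg.1 hget) h


theorem desc_nodot (pre : List Char) : ∀ (t u : Trie), NoDotT t → desc t pre = some u → NoDotT u := by
  induction pre with
  | nil => intro t u hn h; simp [desc] at h; subst h; exact hn
  | cons x pre' ih =>
    intro t u hn h
    match t with
    | .node e cs =>
      simp only [desc] at h
      cases hget : childGet cs x with
      | none => rw [hget] at h; simp at h
      | some v => rw [hget] at h; exact ih v u (nodotC_get cs x v hn hget) h


theorem desc_snoc (pre : List Char) : ∀ (t : Trie) (e : Bool) (cs : Children) (ch : Char) (t' : Trie),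
    desc t pre = some (.node e cs) → childGet cs ch = some t' → desc t (pre ++ [ch]) = some t' := by
  induction pre with
  | nil =>
    intro t e cs ch t' hd hget
    simp [desc] at hd; subst hd
    simp [desc, hget]
  | cons x pre' ih =>
    intro t e cs ch t' hd hget
    match t with
    | .node e0 cs0 =>
      simp only [desc] at hd
      cases hg0 : childGet cs0 x with
      | none => rw [hg0] at hd; simp at hd
      | some v =>
        rw [hg0] at hd
        simp only [List.cons_append, desc, hg0]
        exact ih v e cs ch t' hd hget


theorem replaceFirstDot_prefix (pre : List Char) (rest : List Char) (k : Char) :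
    (∀ x ∈ pre, x ≠ '.') → replaceFirstDot (pre ++ '.' :: rest) k = pre ++ k :: rest := by
  induction pre with
  | nil => intro _; simp [replaceFirstDot]
  | cons x pre' ih =>
    intro hpre
    have hx : (x == '.') = false := by simp [hpre x (by simp)]
    simp only [List.cons_append, replaceFirstDot, hx, Bool.false_eq_true, if_false]
    rw [ih (fun y hy => hpre y (by simp [hy]))]


theorem walkA_no_dot (rem : List Char) : ∀ (f : Nat) (root : Trie) (word : List Char) (curr : Trie),
    rem.count '.' = 0 → walkA f root word curr rem = containsT curr rem := by
  induction rem with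
  | nil =>
    intro f root word curr _
    match curr with
    | .node e cs => simp [walkA, containsT]
  | cons ch rest ih =>
    intro f root word curr hcount
    match curr with
    | .node e cs =>
      have hch : (ch == '.') = false := by
        simp only [List.count_cons] at hcount
        simp; intro h; subst h; simp at hcount
      have hrest : rest.count '.' = 0 := by
        simp only [List.count_cons] at hcount; omega
      simp only [walkA, hch, Bool.false_eq_true, if_false, containsT]
      cases hget : childGet cs ch with
      | none => simp
      | some u => exact ih f root word u hrest


theorem tryA_eq_anyC (f : Nat) (t : Trie) (pre rest : List Char)
    (hpre : ∀ x ∈ pre, x ≠ '.')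
    (e : Bool) (csN : Children)
    (hdesc : desc t pre = some (.node e csN))
    (hndN : NoDotC csN) (hnup : (keysC csN).Nodup)
    (hfuel : ∀ q, q.count '.' < f → searchA f t q = wsearch t q)
    (hcount : rest.count '.' < f)
    (cs : Children) (hsub : ∀ k tk, memC cs k tk → memC csN k tk) :
    tryA f t (pre ++ '.' :: rest) cs = anyC cs rest := by
  match cs with
  | .nil => simp [tryA, anyC]
  | .cons k tk rest0 =>
    have hmem : memC csN k tk := hsub k tk (Or.inl ⟨rfl, rfl⟩)
    have hkdot : k ≠ '.' := memC_nodot csN k tk hndN hmem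
    simp only [tryA, anyC]
    rw [replaceFirstDot_prefix pre rest k hpre]
    have hpre0 : pre.count '.' = 0 := List.count_eq_zero.mpr (fun h => hpre '.' h rfl)
    have hcnt2 : (pre ++ k :: rest).count '.' < f := by
      simp [List.count_append, hpre0, hkdot]
      omega
    rw [hfuel _ hcnt2, wsearch_append pre t (k :: rest) hpre, hdesc]
    have hkb : (k == '.') = false := by simp [hkdot]
    simp only [wsearch, hkb, Bool.false_eq_true, if_false,
      childGet_of_memC csN k tk hnup hmem]
    rw [tryA_eq_anyC f t pre rest hpre e csN hdesc hndN hnup hfuel hcount rest0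
      (fun k' tk' h => hsub k' tk' (Or.inr h))]

theorem searchA_eq_wsearch : ∀ (fuel : Nat) (t : Trie) (p : List Char),
    GoodT t → NoDotT t → p.count '.' < fuel → searchA fuel t p = wsearch t p := by
  intro fuel
  induction fuel with
  | zero => intro t p _ _ h; omega
  | succ f ih =>
    intro t p hg hnd hcount
    have walk : ∀ (rem pre : List Char) (curr : Trie), p = pre ++ rem →
        (∀ x ∈ pre, x ≠ '.') → desc t pre = some curr →
        walkA f t p curr rem = wsearch curr rem := by
      intro rem
      induction rem with
      | nil =>
        intro pre curr _ _ _
        match curr with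
        | .node e cs => simp [walkA, wsearch]
      | cons ch rest ihr =>
        intro pre curr hp hpre hdesc
        match curr with
        | .node e cs =>
          by_cases hch : ch = '.'
          · subst hch
            have hgN : GoodT (.node e cs) := desc_good pre t _ hg hdesc
            have hndN : NoDotT (.node e cs) := desc_nodot pre t _ hnd hdesc
            have hrest : rest.count '.' < f := by
              subst hp
              have hpre0 : pre.count '.' = 0 :=
                List.count_eq_zero.mpr (fun h => hpre '.' h rfl)
              simp [List.count_append, hpre0] at hcount
              omega
            simp only [walkA, beq_self_eq_true, if_true, wsearch]
            rw [hp]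
            exact tryA_eq_anyC f t pre rest hpre e cs hdesc hndN hgN.2
              (fun q hq => ih t q hg hnd hq) hrest cs (fun _ _ h => h)
          · have hchb : (ch == '.') = false := by simp [hch]
            simp only [walkA, hchb, Bool.false_eq_true, if_false, wsearch]
            cases hget : childGet cs ch with
            | none => simp
            | some u =>
              simp only []
              exact ihr (pre ++ [ch]) u (by rw [hp, List.append_assoc]; rfl)
                (by intro x hx
                    rcases List.mem_append.mp hx with h | h
                    · exact hpre x h
                    · simp at h; subst h; exact hch)
                (desc_snoc pre t e cs ch u hdesc hget)
    have h0 : searchA (f + 1) t p = walkA f t p t p := by simp [searchA]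
    rw [h0, walk p [] t rfl (by simp) rfl]


theorem runA_eq_runB : ∀ (pairs : List (String × List String)) (t : Trie) (ws : List String) (da : Bool),
    GoodT t →
    (∀ v, containsT t v = ws.any fun s => v == s.toList) →
    (da = false → NoDotT t) →
    preAux da pairs = true →
    runA t pairs = runB ws pairs := by
  intro pairs
  induction pairs with
  | nil => intro t ws da _ _ _ _; simp [runA, runB]
  | cons hd rest ih =>
    obtain ⟨c, iv⟩ := hd
    intro t ws da hg hinv hda hpre
    by_cases hadd : c = "addWord"
    · subst hadd
      match iv with
      | [] =>
        rw [show preAux da (("addWord", ([] : List String)) :: rest) = false from rfl] at hpre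
        exact absurd hpre (by simp)
      | w :: ivr =>
        have hpre' : (!w.toList.contains '*' &&
            preAux (da || w.toList.contains '.') rest) = true := hpre
        rw [Bool.and_eq_true] at hpre'
        obtain ⟨hstar, hrest⟩ := hpre'
        have hinv' : ∀ v, containsT (addA t w.toList) v =
            (ws ++ [w]).any (fun s => v == s.toList) := by
          intro v
          rw [contains_add, hinv v]
          simp [List.any_append]
        have hda' : (da || w.toList.contains '.') = false → NoDotT (addA t w.toList) := by
          intro h
          simp only [Bool.or_eq_false_iff] at h
          exact nodot_add _ _ (hda h.1) (by simpa using h.2)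
        rw [show runA t (("addWord", w :: ivr) :: rest) =
              none :: runA (addA t w.toList) rest from rfl,
            show runB ws (("addWord", w :: ivr) :: rest) =
              none :: runB (ws ++ [w]) rest from rfl]
        exact congrArg (none :: ·)
          (ih (addA t w.toList) (ws ++ [w]) _ (good_add _ _ hg) hinv' hda' hrest)
    · by_cases hsearch : c = "search"
      · subst hsearch
        match iv with
        | [] =>
          rw [show preAux da (("search", ([] : List String)) :: rest) = false from rfl] at hpre
          exact absurd hpre (by simp)
        | w :: ivr =>
          have hpre' : ((!w.toList.contains '*' && !(w.toList.contains '.' && da)) &&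
              preAux da rest) = true := hpre
          rw [Bool.and_eq_true, Bool.and_eq_true] at hpre'
          obtain ⟨⟨hstar, hdot⟩, hrest⟩ := hpre'
          rw [show runA t (("search", w :: ivr) :: rest) =
                some (searchA (w.toList.count '.' + 1) t w.toList) :: runA t rest from rfl,
              show runB ws (("search", w :: ivr) :: rest) =
                some (ws.any fun s => mtchB w s) :: runB ws rest from rfl]
          refine congrArg₂ (fun a b => some a :: b) ?_ (ih t ws da hg hinv hda hrest)
          -- the head: A's restart search equals B's scan of the word list
          by_cases hd0c : w.toList.count '.' = 0
          · -- wildcard-free search: plain trie descent vs list lookup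
            have hA : searchA (w.toList.count '.' + 1) t w.toList = containsT t w.toList := by
              rw [hd0c]
              have h1 : searchA 1 t w.toList = walkA 0 t w.toList t w.toList := by
                simp [searchA]
              rw [h1, walkA_no_dot w.toList 0 t w.toList t hd0c]
            rw [hA, hinv w.toList]
            refine congrArg ws.any (funext fun s => ?_)
            rw [mtchB_eq, mtchR_no_dot _ _ (by rwa [← List.count_eq_zero])]
          · -- the searched word contains '.', so Pre_ forces a dot-free trie
            have hmem : '.' ∈ w.toList := List.count_pos_iff.mp (by omega)
            have hnd' : NoDotT t := by
              apply hda
              have hcont : w.toList.contains '.' = true := by simpa using hmem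
              rw [hcont] at hdot
              simpa using hdot
            rw [searchA_eq_wsearch _ t w.toList hg hnd' (by omega)]
            have hmain := wsearch_correct w.toList t hg
            cases hB : (ws.any fun s => mtchB w s)
            · cases hw : wsearch t w.toList
              · rfl
              · exfalso
                obtain ⟨v, hcv, hmv⟩ := hmain.mp hw
                rw [hinv v] at hcv
                obtain ⟨s, hs, hvs⟩ := List.any_eq_true.mp hcv
                rw [List.any_eq_false] at hB
                apply hB s hs
                rw [mtchB_eq]
                rwa [show v = s.toList from by simpa using hvs] at hmv
            · obtain ⟨s, hs, hms⟩ := List.any_eq_true.mp hB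
              refine hmain.mpr ⟨s.toList, ?_, by rwa [mtchB_eq] at hms⟩
              rw [hinv s.toList]
              exact List.any_eq_true.mpr ⟨s, hs, by simp⟩
      · by_cases hwd : c = "WordDictionary"
        · subst hwd
          have hpre' : preAux da rest = true := hpre
          rw [show runA t (("WordDictionary", iv) :: rest) = none :: runA t rest from rfl,
              show runB ws (("WordDictionary", iv) :: rest) = none :: runB ws rest from rfl]
          exact congrArg (none :: ·) (ih t ws da hg hinv hda hpre')
        · simp only [preAux] at hpre
          rw [if_neg hadd, if_neg hsearch] at hpre
          simp only [runA, runB]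
          rw [if_neg hwd, if_neg hadd, if_neg hsearch,
            if_neg hwd, if_neg hadd, if_neg hsearch]
          exact ih t ws da hg hinv hda hpre

-- ===== VERDICT (by name: the statement is the Claim_ definition above) =====
theorem run_with_spec : Claim_equal_run_with := by
  intro commands inputs _ hpre
  unfold Spec_run_with run_with run_with_alt
  exact runA_eq_runB (List.zip commands inputs) emptyT [] false
    (by constructor <;> simp [GoodC, keysC])
    (fun v => by simp [contains_empty])
    (fun _ => by simp [NoDotT, NoDotC, emptyT])
    hpre
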